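-- pv_equiv track=rewrite | github.com/Emilybtoliveira/Eiffel-Compiler | main.py | operatorsRecognizer
-- ===== SOURCE A (Python) =====
-- operators = ["=", "/=", "<", ">", "<=", ">=", "+", "-",
--              "*", "/", "//", "^", ":=", ":", "."]
--
-- class MEG:
--     def __init__(self, states, events, initialState, acceptanceStates):
--         if type(acceptanceStates) != list:
--             acceptanceStates = [acceptanceStates]
--
--         self.states = states
--         self.events = events
--         self.currentState = initialState
--         self.acceptanceStates = acceptanceStates
--
--         if (initialState not in states):
--             states.append(initialState)
--
--         if ("err" not in states):
--             states.append("err")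
--
--         self.transitionTable = {}
--         for state in states:
--             self.transitionTable[state] = {}
--             for event in events:
--                 self.transitionTable[state][event] = "err"
--
--     def setTransitionRule(self, originState, events, targetState):
--         if ((originState not in self.states) or (targetState not in self.states)):
--             return
--
--         if (type(events) != list):
--             events = [events]
--
--         for event in events:
--             if (event in self.events):
--                 self.transitionTable[originState][event] = targetState
--
--     def gotoNextState(self, event):
--         if ((event not in self.events) or (self.currentState not in self.states)):
--             self.currentState = "err"
--             return "err"
--
--         self.currentState = self.transitionTable[self.currentState][event]
--         return self.currentState
--
--     def recognizes(self):
--         return self.currentState in self.acceptanceStates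
--
-- def operatorsRecognizer(stack):
--
--     states = ['q0', 'qf', 'qintdivide', 'qintmenor', 'qintmaior', 'qintpontos']
--     events = operators+[" ", '\n']
--     meg = MEG(states, events, 'q0', 'qf')
--
--     meg.setTransitionRule('q0', ["=", "+", "-", "*", "^", "."], 'qf')
--     meg.setTransitionRule('q0', ['/'], 'qf')
--     meg.setTransitionRule('qf', ['/', '='], 'qf')
--
--     meg.setTransitionRule('q0', ['<'], 'qf')
--     meg.setTransitionRule('qf', ['=', ""], 'qf')
--
--     meg.setTransitionRule('q0', ['>'], 'qf')
--     meg.setTransitionRule('qf', ['=', ""], 'qf')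
--
--     meg.setTransitionRule('q0', [':'], 'qf')
--     meg.setTransitionRule('qf', ['=', ""], 'qf')
--
--     for char in stack:
--         meg.gotoNextState(char)
--
--     return meg.recognizes()
-- ===== SOURCE B (Python) =====
-- def operatorsRecognizer(stack):
--     chars = list(stack)
--     if not chars:
--         return False
--     if chars[0] not in {"=", "+", "-", "*", "^", ".", "/", "<", ">", ":"}:
--         return False
--     return all(c in {"/", "="} for c in chars[1:])
-- ===== Notes on version B (the rewrite author's own statement) =====
-- stated objective: simpler
-- what changed: Dropped the MEG class, its transition-table construction and the running-state scan; B checks the first character against the start set and requires every remaining character to lie in the two-character continuation set, which is exactly the language the DFA accepts.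
import Mathlib
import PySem

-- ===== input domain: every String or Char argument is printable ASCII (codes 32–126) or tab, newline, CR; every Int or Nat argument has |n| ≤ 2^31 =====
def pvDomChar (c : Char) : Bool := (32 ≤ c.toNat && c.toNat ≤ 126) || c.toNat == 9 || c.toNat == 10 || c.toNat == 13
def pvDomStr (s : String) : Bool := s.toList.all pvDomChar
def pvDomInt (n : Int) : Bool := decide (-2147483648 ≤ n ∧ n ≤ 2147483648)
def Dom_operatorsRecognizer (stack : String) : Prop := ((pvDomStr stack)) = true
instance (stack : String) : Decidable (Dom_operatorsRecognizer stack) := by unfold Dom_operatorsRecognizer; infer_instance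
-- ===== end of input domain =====

-- B drops A's MEG class (transition-table construction + running-state scan) for a direct check: first char in the start set, every later char '/' or '='. Objective: simpler.

-- ===== PORT A =====
def pvOperators : List String := ["=", "/=", "<", ">", "<=", ">=", "+", "-",
  "*", "/", "//", "^", ":=", ":", "."]

structure MEG where
  states : List String
  events : List String
  currentState : String
  acceptanceStates : List String
  transitionTable : PySem.Dict String (PySem.Dict String String)
deriving Repr, DecidableEq

-- MEG.__init__ (A passes a single acceptance state 'qf'; the type-check branch wraps it in a list)
def megInit (states0 events : List String) (initialState : String) (acceptanceState : String) : MEG :=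
  let states1 := if initialState ∈ states0 then states0 else states0 ++ [initialState]
  let states := if "err" ∈ states1 then states1 else states1 ++ ["err"]
  let table := states.foldl (fun t s =>
      t.insert s (events.foldl (fun row e => row.insert e "err") PySem.Dict.empty)) PySem.Dict.empty
  ⟨states, events, initialState, [acceptanceState], table⟩

-- MEG.setTransitionRule (always called with a list of events in A)
def megSetRule (m : MEG) (originState : String) (events : List String) (targetState : String) : MEG :=
  if originState ∉ m.states ∨ targetState ∉ m.states then m
  else events.foldl (fun m ev =>
    if ev ∈ m.events then
      { m with transitionTable :=
          m.transitionTable.modify originState PySem.Dict.empty (fun row => row.insert ev targetState) }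
    else m) m

-- MEG.gotoNextState; the two getD defaults mirror Python's d[k]: in A both keys are always present
-- (currentState ∈ states and ev ∈ events hold on this branch and __init__ seeded every (state, event) pair),
-- so the defaults are never taken and no KeyError can occur.
def megGoto (m : MEG) (ev : String) : MEG :=
  if ev ∉ m.events ∨ m.currentState ∉ m.states then { m with currentState := "err" }
  else { m with currentState := (m.transitionTable.getD m.currentState PySem.Dict.empty).getD ev "err" }

def operatorsRecognizer (stack : String) : Bool :=
  let states := ["q0", "qf", "qintdivide", "qintmenor", "qintmaior", "qintpontos"]
  let events := pvOperators ++ [" ", "\n"]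
  let meg := megInit states events "q0" "qf"
  let meg := megSetRule meg "q0" ["=", "+", "-", "*", "^", "."] "qf"
  let meg := megSetRule meg "q0" ["/"] "qf"
  let meg := megSetRule meg "qf" ["/", "="] "qf"
  let meg := megSetRule meg "q0" ["<"] "qf"
  let meg := megSetRule meg "qf" ["=", ""] "qf"
  let meg := megSetRule meg "q0" [">"] "qf"
  let meg := megSetRule meg "qf" ["=", ""] "qf"
  let meg := megSetRule meg "q0" [":"] "qf"
  let meg := megSetRule meg "qf" ["=", ""] "qf"
  let meg := stack.toList.foldl (fun m c => megGoto m (String.singleton c)) meg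
  decide (meg.currentState ∈ meg.acceptanceStates)

-- ===== PORT B =====
def operatorsRecognizer_alt (stack : String) : Bool :=
  match stack.toList with
  | [] => false
  | c :: rest =>
    if c ∈ ['=', '+', '-', '*', '^', '.', '/', '<', '>', ':'] then
      rest.all (fun d => d == '/' || d == '=')
    else false

-- ===== PRECONDITION & SPEC =====
def Spec_operatorsRecognizer (stack : String) (out : Bool) : Prop := out = operatorsRecognizer_alt stack
instance (stack : String) (out : Bool) : Decidable (Spec_operatorsRecognizer stack out) := by unfold Spec_operatorsRecognizer; infer_instance

-- ===== CLAIM (what is proved, stated in full; the proofs are below) =====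
def Claim_equal_operatorsRecognizer : Prop := ∀ (stack : String), Dom_operatorsRecognizer stack → Spec_operatorsRecognizer stack (operatorsRecognizer stack)

-- ===== LEMMAS AND PROOFS =====

-- A's fully built machine, as a function of its current state
def pvM (s : String) : MEG :=
  megSetRule (megSetRule (megSetRule (megSetRule (megSetRule (megSetRule (megSetRule (megSetRule (megSetRule
    (megInit ["q0", "qf", "qintdivide", "qintmenor", "qintmaior", "qintpontos"] (pvOperators ++ [" ", "\n"]) s "qf")
    "q0" ["=", "+", "-", "*", "^", "."] "qf") "q0" ["/"] "qf") "qf" ["/", "="] "qf")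
    "q0" ["<"] "qf") "qf" ["=", ""] "qf") "q0" [">"] "qf") "qf" ["=", ""] "qf")
    "q0" [":"] "qf") "qf" ["=", ""] "qf"

lemma not_mem_events (c : Char) (hm : c ∉ ['=', '<', '>', '+', '-', '*', '/', '^', ':', '.', ' ', '\n']) :
    String.singleton c ∉ pvOperators ++ [" ", "\n"] := by
  intro h
  have h2 := List.mem_map_of_mem (f := String.toList) h
  simp only [pvOperators] at h2
  simp at h2
  simp at hm
  tauto

lemma step_err (c : Char) : megGoto (pvM "err") (String.singleton c) = pvM "err" := by
  by_cases he : c ∈ ['=', '<', '>', '+', '-', '*', '/', '^', ':', '.', ' ', '\n']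
  · fin_cases he <;> decide
  · have hne := not_mem_events c he
    have hev : (pvM "err").events = pvOperators ++ [" ", "\n"] := by decide
    unfold megGoto
    rw [if_pos (Or.inl (hev ▸ hne))]
    decide

lemma step_q0 (c : Char) :
    megGoto (pvM "q0") (String.singleton c) =
      pvM (if c ∈ ['=', '+', '-', '*', '^', '.', '/', '<', '>', ':'] then "qf" else "err") := by
  by_cases he : c ∈ ['=', '<', '>', '+', '-', '*', '/', '^', ':', '.', ' ', '\n']
  · fin_cases he <;> decide
  · have h0 : c ∉ ['=', '+', '-', '*', '^', '.', '/', '<', '>', ':'] := by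
      intro hh; apply he; simp at hh ⊢; tauto
    rw [if_neg h0]
    have hne := not_mem_events c he
    have hev : (pvM "q0").events = pvOperators ++ [" ", "\n"] := by decide
    unfold megGoto
    rw [if_pos (Or.inl (hev ▸ hne))]
    decide

lemma step_qf (c : Char) :
    megGoto (pvM "qf") (String.singleton c) =
      pvM (if (c == '/' || c == '=') = true then "qf" else "err") := by
  by_cases he : c ∈ ['=', '<', '>', '+', '-', '*', '/', '^', ':', '.', ' ', '\n']
  · fin_cases he <;> decide
  · have h0 : (c == '/' || c == '=') = false := by
      simp at he ⊢; constructor <;> (intro hh; subst hh; tauto)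
    rw [h0]
    have hne := not_mem_events c he
    have hev : (pvM "qf").events = pvOperators ++ [" ", "\n"] := by decide
    unfold megGoto
    rw [if_pos (Or.inl (hev ▸ hne))]
    decide

lemma fold_err (l : List Char) :
    l.foldl (fun m c => megGoto m (String.singleton c)) (pvM "err") = pvM "err" := by
  induction l with
  | nil => rfl
  | cons c t ih => rw [List.foldl_cons, step_err, ih]

lemma fold_qf (l : List Char) :
    l.foldl (fun m c => megGoto m (String.singleton c)) (pvM "qf") =
      pvM (if l.all (fun d => d == '/' || d == '=') then "qf" else "err") := by
  induction l with
  | nil => rfl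
  | cons c t ih =>
    rw [List.foldl_cons, step_qf]
    cases hc : (c == '/' || c == '=') with
    | true => simp [ih, List.all_cons, hc]
    | false => simp [fold_err, List.all_cons, hc]

lemma opA_eq (stack : String) :
    operatorsRecognizer stack =
      decide ((stack.toList.foldl (fun m c => megGoto m (String.singleton c)) (pvM "q0")).currentState
        ∈ (stack.toList.foldl (fun m c => megGoto m (String.singleton c)) (pvM "q0")).acceptanceStates) := rfl

-- ===== VERDICT (by name: the statement is the Claim_ definition above) =====
theorem operatorsRecognizer_spec : Claim_equal_operatorsRecognizer := by
  intro stack _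
  unfold Spec_operatorsRecognizer operatorsRecognizer_alt
  rw [opA_eq]
  cases h : stack.toList with
  | nil => decide
  | cons c t =>
    rw [List.foldl_cons, step_q0]
    by_cases hc : c ∈ ['=', '+', '-', '*', '^', '.', '/', '<', '>', ':']
    · rw [if_pos hc, fold_qf]
      cases ht : t.all (fun d => d == '/' || d == '=') with
      | true => simp [hc, ht]; decide
      | false => simp [hc, ht]; decide
    · rw [if_neg hc, fold_err]
      simp [hc]
      decide
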